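-- pv_equiv track=rewrite | github.com/shivammehta25/Fun-Coding | AdventOfCode2025/Day9/solution.py | find_suitable_dots
-- ===== SOURCE A (Python) =====
-- def find_suitable_dots(arr_new, curr_r_count, l=0):
--     if l >= len(arr_new):
--         return -1
--
--     while l < len(arr_new) and arr_new[l] != ".":
--         l += 1
--
--     curr_dot_count = 0
--     while l < len(arr_new):
--         if arr_new[l] == ".":
--             curr_dot_count += 1
--         else:
--             break
--
--         l += 1
--
--     if curr_dot_count >= curr_r_count:
--         return l - curr_dot_count
--     else:
--         l = find_suitable_dots(arr_new, curr_r_count, l)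
--
--     return l
-- ===== SOURCE B (Python) =====
-- def find_suitable_dots(arr_new, curr_r_count, l=0):
--     # One-pass run-length scan instead of skip/count loops + tail recursion.
--     n = len(arr_new)
--     if l >= n:
--         return -1
--     count = 0
--     i = l
--     while i < n:
--         if arr_new[i] == ".":
--             count += 1
--         else:
--             if count > 0 and count >= curr_r_count:
--                 return i - count
--             count = 0
--         i += 1
--     if count >= curr_r_count:
--         return n - count
--     return -1
-- ===== Notes on version B (the rewrite author's own statement) =====
-- stated objective: simpler
-- what changed: Replaced A's tail recursion with separate skip/count inner loops by a single one-pass run-length scan that keeps the current dot-run length in an accumulator and checks the threshold at each run boundary and at the end.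
import Mathlib
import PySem

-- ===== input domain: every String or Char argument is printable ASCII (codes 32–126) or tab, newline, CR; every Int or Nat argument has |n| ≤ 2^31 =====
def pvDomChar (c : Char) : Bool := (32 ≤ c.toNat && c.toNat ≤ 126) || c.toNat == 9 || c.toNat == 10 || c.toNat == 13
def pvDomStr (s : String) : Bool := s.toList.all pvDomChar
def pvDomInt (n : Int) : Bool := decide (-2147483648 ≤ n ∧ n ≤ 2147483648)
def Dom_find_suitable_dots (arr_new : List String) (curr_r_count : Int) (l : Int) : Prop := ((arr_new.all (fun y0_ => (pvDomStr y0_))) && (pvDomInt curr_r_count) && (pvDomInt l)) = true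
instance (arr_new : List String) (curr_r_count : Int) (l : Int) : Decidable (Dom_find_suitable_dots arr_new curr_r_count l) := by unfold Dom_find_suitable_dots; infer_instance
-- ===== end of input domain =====

-- B replaces A's recursion-with-two-inner-loops by one run-length scan (objective: simpler).
-- The Nat fuel arguments below only make the loops total; they are always ample inside Pre_.

-- ===== PORT A =====
-- while l < len(arr_new) and arr_new[l] != ".": l += 1
def pvSkipA (arr_new : List String) : Nat → Int → Int
  | 0, l => l
  | fuel + 1, l =>
    if l < (arr_new.length : Int) then
      match PySem.List.pyGet? arr_new l with
      | some s => if s ≠ "." then pvSkipA arr_new fuel (l + 1) else l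
      | none => l   -- Python raises IndexError here (only when l < -len, outside Pre_)
    else l

-- curr_dot_count = 0; while l < len(arr_new): if arr_new[l]=="." then count+=1 else break; l+=1
def pvCountA (arr_new : List String) : Nat → Int → Int → Int × Int
  | 0, l, cnt => (l, cnt)
  | fuel + 1, l, cnt =>
    if l < (arr_new.length : Int) then
      match PySem.List.pyGet? arr_new l with
      | some s => if s = "." then pvCountA arr_new fuel (l + 1) (cnt + 1) else (l, cnt)
      | none => (l, cnt)  -- Python raises IndexError here (outside Pre_)
    else (l, cnt)

-- the recursive body of A (each pass strictly increases l inside Pre_)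
def pvMainA (arr_new : List String) (curr_r_count : Int) : Nat → Int → Int
  | 0, _ => -1
  | fuel + 1, l =>
    if l ≥ (arr_new.length : Int) then -1
    else
      let l1 := pvSkipA arr_new ((arr_new.length : Int) - l).toNat l
      let p := pvCountA arr_new ((arr_new.length : Int) - l1).toNat l1 0
      if p.2 ≥ curr_r_count then p.1 - p.2
      else pvMainA arr_new curr_r_count fuel p.1

def find_suitable_dots (arr_new : List String) (curr_r_count : Int) (l : Int) : Int :=
  pvMainA arr_new curr_r_count (((arr_new.length : Int) - l).toNat + 1) l

-- ===== PORT B =====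
-- the single while loop of B: i scans forward, count = length of the current dot run;
-- the fuel-0 branch coincides with the loop-exit branch (fuel runs out exactly at i = len)
def pvScanB (arr_new : List String) (curr_r_count : Int) : Nat → Int → Int → Int
  | 0, _, count => if count ≥ curr_r_count then (arr_new.length : Int) - count else -1
  | fuel + 1, i, count =>
    if i < (arr_new.length : Int) then
      match PySem.List.pyGet? arr_new i with
      | some s =>
          if s = "." then pvScanB arr_new curr_r_count fuel (i + 1) (count + 1)
          else if count > 0 ∧ count ≥ curr_r_count then i - count
          else pvScanB arr_new curr_r_count fuel (i + 1) 0
      | none => 0  -- Python raises IndexError here (outside Pre_)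
    else if count ≥ curr_r_count then (arr_new.length : Int) - count else -1

def find_suitable_dots_alt (arr_new : List String) (curr_r_count : Int) (l : Int) : Int :=
  if l ≥ (arr_new.length : Int) then -1
  else pvScanB arr_new curr_r_count ((arr_new.length : Int) - l).toNat l 0

-- ===== PRECONDITION & SPEC =====
-- Pre_ excludes exactly the inputs where A raises IndexError: l below -len(arr_new)
-- (Python's negative indexing then falls off the front of the list).
def Pre_find_suitable_dots (arr_new : List String) (curr_r_count : Int) (l : Int) : Prop :=
  -(arr_new.length : Int) ≤ l
instance (arr_new : List String) (curr_r_count : Int) (l : Int) : Decidable (Pre_find_suitable_dots arr_new curr_r_count l) := by unfold Pre_find_suitable_dots; infer_instance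

def pvWitness_find_suitable_dots : List String × Int × Int := (["x", ".", ".", "y", "."], 2, 0)

def Spec_find_suitable_dots (arr_new : List String) (curr_r_count : Int) (l : Int) (out : Int) : Prop := out = find_suitable_dots_alt arr_new curr_r_count l
instance (arr_new : List String) (curr_r_count : Int) (l : Int) (out : Int) : Decidable (Spec_find_suitable_dots arr_new curr_r_count l out) := by unfold Spec_find_suitable_dots; infer_instance

-- ===== CLAIM (what is proved, stated in full; the proofs are below) =====
def Claim_equal_find_suitable_dots : Prop := ∀ (arr_new : List String) (curr_r_count : Int) (l : Int), Dom_find_suitable_dots arr_new curr_r_count l → Pre_find_suitable_dots arr_new curr_r_count l → Spec_find_suitable_dots arr_new curr_r_count l (find_suitable_dots arr_new curr_r_count l)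

-- ===== LEMMAS AND PROOFS =====

theorem pvGet_some (arr : List String) (i : Int)
    (h1 : -(arr.length : Int) ≤ i) (h2 : i < (arr.length : Int)) :
    ∃ s, PySem.List.pyGet? arr i = some s := by
  cases hg : PySem.List.pyGet? arr i with
  | some s => exact ⟨s, rfl⟩
  | none =>
      rw [PySem.List.pyGet?_eq_none_iff] at hg
      exact absurd ⟨h1, h2⟩ hg

theorem pvSkipA_ge (arr : List String) (f : Nat) :
    ∀ l : Int, l ≤ pvSkipA arr f l := by
  induction f with
  | zero => intro l; simp [pvSkipA]
  | succ f ih =>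
      intro l
      rw [pvSkipA]
      split
      · cases hg : PySem.List.pyGet? arr l with
        | some s =>
            simp only [hg]
            split
            · have := ih (l + 1); omega
            · omega
        | none => simp only [hg]; omega
      · omega

theorem pvSkipA_le (arr : List String) (f : Nat) :
    ∀ l : Int, l ≤ (arr.length : Int) → pvSkipA arr f l ≤ (arr.length : Int) := by
  induction f with
  | zero => intro l hl; simpa [pvSkipA] using hl
  | succ f ih =>
      intro l hl
      rw [pvSkipA]
      split
      · cases hg : PySem.List.pyGet? arr l with
        | some s =>
            simp only [hg]
            split
            · exact ih (l + 1) (by omega)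
            · omega
        | none => simp only [hg]; omega
      · omega

theorem pvSkipA_stop (arr : List String) (f : Nat) :
    ∀ l : Int, -(arr.length : Int) ≤ l → ((arr.length : Int) - l).toNat ≤ f →
    (arr.length : Int) ≤ pvSkipA arr f l ∨
      PySem.List.pyGet? arr (pvSkipA arr f l) = some "." := by
  induction f with
  | zero => intro l _ hf; left; simp only [pvSkipA]; omega
  | succ f ih =>
      intro l hl hf
      rw [pvSkipA]
      by_cases h : l < (arr.length : Int)
      · rw [if_pos h]
        obtain ⟨s, hg⟩ := pvGet_some arr l hl h
        simp only [hg]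
        by_cases hs : s ≠ "."
        · rw [if_pos hs]
          exact ih (l + 1) (by omega) (by omega)
        · rw [if_neg hs]
          right
          rw [hg, not_not.mp hs]
      · rw [if_neg h]
        left
        omega

-- the scan result does not depend on the fuel, as long as the fuel is ample
theorem pvScanB_fuel (arr : List String) (cr : Int) (f : Nat) :
    ∀ (g : Nat) (i c : Int), ((arr.length : Int) - i).toNat ≤ f →
      ((arr.length : Int) - i).toNat ≤ g →
      pvScanB arr cr f i c = pvScanB arr cr g i c := by
  induction f with
  | zero =>
      intro g i c hf hg
      cases g with
      | zero => rfl
      | succ g =>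
          rw [pvScanB, pvScanB,
              if_neg (show ¬ i < (arr.length : Int) by omega)]
  | succ f ih =>
      intro g i c hf hg
      cases g with
      | zero =>
          rw [pvScanB, pvScanB,
              if_neg (show ¬ i < (arr.length : Int) by omega)]
      | succ g =>
          rw [pvScanB]
          conv_rhs => rw [pvScanB]
          by_cases h : i < (arr.length : Int)
          · rw [if_pos h, if_pos h]
            cases hgt : PySem.List.pyGet? arr i with
            | some s =>
                simp only [hgt]
                by_cases hs : s = "."
                · rw [if_pos hs, if_pos hs]
                  exact ih g (i + 1) (c + 1) (by omega) (by omega)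
                · rw [if_neg hs, if_neg hs]
                  by_cases hc : c > 0 ∧ c ≥ cr
                  · rw [if_pos hc, if_pos hc]
                  · rw [if_neg hc, if_neg hc]
                    exact ih g (i + 1) 0 (by omega) (by omega)
            | none => simp only [hgt]
          · rw [if_neg h, if_neg h]

-- likewise for the count loop
theorem pvCountA_fuel (arr : List String) (f : Nat) :
    ∀ (g : Nat) (i c : Int), ((arr.length : Int) - i).toNat ≤ f →
      ((arr.length : Int) - i).toNat ≤ g →
      pvCountA arr f i c = pvCountA arr g i c := by
  induction f with
  | zero =>
      intro g i c hf hg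
      cases g with
      | zero => rfl
      | succ g => rw [pvCountA, pvCountA,
          if_neg (show ¬ i < (arr.length : Int) by omega)]
  | succ f ih =>
      intro g i c hf hg
      cases g with
      | zero => rw [pvCountA, pvCountA,
          if_neg (show ¬ i < (arr.length : Int) by omega)]
      | succ g =>
          rw [pvCountA]
          conv_rhs => rw [pvCountA]
          by_cases h : i < (arr.length : Int)
          · rw [if_pos h, if_pos h]
            cases hgt : PySem.List.pyGet? arr i with
            | some s =>
                simp only [hgt]
                by_cases hs : s = "."
                · rw [if_pos hs, if_pos hs]
                  exact ih g (i + 1) (c + 1) (by omega) (by omega)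
                · rw [if_neg hs, if_neg hs]
            | none => simp only [hgt]
          · rw [if_neg h, if_neg h]

-- B's scan with count 0 passes over non-dots exactly like A's skip loop
theorem pvScanB_skip (arr : List String) (cr : Int) (f : Nat) :
    ∀ l : Int, -(arr.length : Int) ≤ l → ((arr.length : Int) - l).toNat ≤ f →
      pvScanB arr cr f l 0 = pvScanB arr cr f (pvSkipA arr f l) 0 := by
  induction f with
  | zero => intro l _ _; rfl
  | succ f ih =>
      intro l hl hf
      conv_lhs => rw [pvScanB]
      rw [pvSkipA]
      by_cases h : l < (arr.length : Int)
      · rw [if_pos h, if_pos h]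
        obtain ⟨s, hg⟩ := pvGet_some arr l hl h
        simp only [hg]
        by_cases hs : s ≠ "."
        · rw [if_pos hs]
          rw [if_neg (show ¬ s = "." from hs),
              if_neg (show ¬((0 : Int) > 0 ∧ (0 : Int) ≥ cr) by omega)]
          rw [ih (l + 1) (by omega) (by omega)]
          have hge := pvSkipA_ge arr f (l + 1)
          exact pvScanB_fuel arr cr f (f + 1) (pvSkipA arr f (l + 1)) 0
            (by omega) (by omega)
        · have hs' : s = "." := not_not.mp hs
          subst hs'
          rw [if_neg hs]
          conv_rhs => rw [pvScanB]
          rw [if_pos h]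
          simp only [hg]
      · rw [if_neg h, if_neg h]
        conv_rhs => rw [pvScanB]
        rw [if_neg h]

theorem pvCountA_spec (arr : List String) (f : Nat) :
    ∀ (l c : Int), ((arr.length : Int) - l).toNat ≤ f → l ≤ (arr.length : Int) →
      l ≤ (pvCountA arr f l c).1 ∧ (pvCountA arr f l c).1 ≤ (arr.length : Int) ∧
      (pvCountA arr f l c).2 = c + ((pvCountA arr f l c).1 - l) ∧
      ((arr.length : Int) ≤ (pvCountA arr f l c).1 ∨
        ¬ PySem.List.pyGet? arr ((pvCountA arr f l c).1) = some ".") ∧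
      (l < (arr.length : Int) → PySem.List.pyGet? arr l = some "." →
        l + 1 ≤ (pvCountA arr f l c).1) := by
  induction f with
  | zero =>
      intro l c hf hl
      simp only [pvCountA]
      refine ⟨le_refl l, hl, by omega, Or.inl (by omega), by omega⟩
  | succ f ih =>
      intro l c hf hl
      rw [pvCountA]
      by_cases h : l < (arr.length : Int)
      · rw [if_pos h]
        cases hg : PySem.List.pyGet? arr l with
        | some s =>
            simp only [hg]
            by_cases hs : s = "."
            · rw [if_pos hs]
              obtain ⟨h1, h2, h3, h4, h5⟩ := ih (l + 1) (c + 1) (by omega) (by omega)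
              exact ⟨by omega, h2, by omega, h4, by intro _ _; omega⟩
            · rw [if_neg hs]
              refine ⟨le_refl l, by omega, by omega, Or.inr ?_, ?_⟩
              · intro hc
                have hc' : PySem.List.pyGet? arr l = some "." := hc
                rw [hg] at hc'
                exact hs (by injection hc')
              · intro _ hdot
                exact (hs (by injection hdot)).elim
        | none =>
            simp only [hg]
            refine ⟨le_refl l, by omega, by omega, Or.inr ?_, ?_⟩
            · intro hc
              simp at hc
            · intro _ hdot
              simp at hdot
      · rw [if_neg h]
        refine ⟨le_refl l, hl, by omega, Or.inl (by omega), by omega⟩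

-- B's scan across a dot run, expressed through A's count loop
theorem pvScanB_count (arr : List String) (cr : Int) (f : Nat) :
    ∀ (i c : Int), -(arr.length : Int) ≤ i → i ≤ (arr.length : Int) →
      ((arr.length : Int) - i).toNat ≤ f →
      pvScanB arr cr f i c =
        (if (pvCountA arr f i c).1 < (arr.length : Int) then
          (if (pvCountA arr f i c).2 > 0 ∧ (pvCountA arr f i c).2 ≥ cr then
            (pvCountA arr f i c).1 - (pvCountA arr f i c).2
          else pvScanB arr cr ((arr.length : Int) - ((pvCountA arr f i c).1 + 1)).toNat
                 ((pvCountA arr f i c).1 + 1) 0)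
        else (if (pvCountA arr f i c).2 ≥ cr then
                (pvCountA arr f i c).1 - (pvCountA arr f i c).2 else -1)) := by
  induction f with
  | zero =>
      intro i c hi hin hf
      have hieq : i = (arr.length : Int) := by omega
      subst hieq
      simp only [pvCountA, pvScanB]
      rw [if_neg (show ¬ (arr.length : Int) < (arr.length : Int) by omega)]
  | succ f ih =>
      intro i c hi hin hf
      rw [pvScanB, pvCountA]
      by_cases h : i < (arr.length : Int)
      · obtain ⟨s, hg⟩ := pvGet_some arr i hi h
        simp only [if_pos h, hg]
        by_cases hs : s = "."
        · rw [if_pos hs, if_pos hs]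
          exact ih (i + 1) (c + 1) (by omega) (by omega) (by omega)
        · rw [if_neg hs, if_neg hs]
          try dsimp only
          rw [if_pos h]
          by_cases hc : c > 0 ∧ c ≥ cr
          · rw [if_pos hc, if_pos hc]
          · rw [if_neg hc, if_neg hc]
            exact pvScanB_fuel arr cr f (((arr.length : Int) - (i + 1)).toNat) (i + 1) 0
              (by omega) (by omega)
      · simp only [if_neg h]
        try dsimp only
        have hieq : i = (arr.length : Int) := by omega
        try rw [if_neg (show ¬ i < (arr.length : Int) by omega)]
        rw [hieq]

-- the main correspondence: A's recursion equals B's single scan, given enough fuel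
theorem pvMain_eq (arr : List String) (cr : Int) (fuel : Nat) :
    ∀ l : Int, -(arr.length : Int) ≤ l → ((arr.length : Int) - l).toNat < fuel →
      pvMainA arr cr fuel l =
        (if l ≥ (arr.length : Int) then -1
         else pvScanB arr cr ((arr.length : Int) - l).toNat l 0) := by
  induction fuel with
  | zero => intro l _ hf; omega
  | succ fuel ih =>
      intro l hl hf
      simp only [pvMainA]
      by_cases hln : l ≥ (arr.length : Int)
      · rw [if_pos hln, if_pos hln]
      · rw [if_neg hln, if_neg hln]
        rw [ge_iff_le, not_le] at hln
        set l1 := pvSkipA arr ((arr.length : Int) - l).toNat l with hl1def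
        have hll1 : l ≤ l1 := pvSkipA_ge arr _ l
        have hl1n : l1 ≤ (arr.length : Int) := pvSkipA_le arr _ l (by omega)
        rw [pvScanB_skip arr cr _ l hl (le_refl _), ← hl1def]
        by_cases hcase : l1 < (arr.length : Int)
        · -- the skip loop stopped on a dot
          have hdot : PySem.List.pyGet? arr l1 = some "." := by
            rcases pvSkipA_stop arr ((arr.length : Int) - l).toNat l hl (le_refl _) with h | h
            · omega
            · rw [← hl1def] at h; exact h
          -- align the two count-loop fuels
          have hfuel : pvCountA arr (((arr.length : Int) - l).toNat) l1 0 =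
              pvCountA arr (((arr.length : Int) - l1).toNat) l1 0 :=
            pvCountA_fuel arr _ _ l1 0 (by omega) (le_refl _)
          rw [pvScanB_count arr cr _ l1 0 (by omega) (by omega) (by omega), hfuel]
          set p := pvCountA arr (((arr.length : Int) - l1).toNat) l1 0 with hpdef
          have hspec := pvCountA_spec arr (((arr.length : Int) - l1).toNat) l1 0
            (le_refl _) (by omega)
          rw [← hpdef] at hspec
          obtain ⟨hp0, hp2, hp3, hp4, hp5⟩ := hspec
          have hp1 : l1 + 1 ≤ p.1 := hp5 hcase hdot
          have hpos : p.2 > 0 := by omega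
          by_cases hcr : p.2 ≥ cr
          · rw [if_pos hcr]
            by_cases hpn : p.1 < (arr.length : Int)
            · rw [if_pos hpn, if_pos ⟨hpos, hcr⟩]
            · rw [if_neg hpn, if_pos hcr]
          · rw [if_neg hcr]
            have hArec := ih p.1 (by omega) (by omega)
            by_cases hpn : p.1 < (arr.length : Int)
            · rw [if_pos hpn, if_neg (fun hc => hcr hc.2)]
              rw [hArec, if_neg (by omega)]
              -- A continues at p.1 (a non-dot): its scan first steps over it with count 0
              obtain ⟨s, hg⟩ := pvGet_some arr p.1 (by omega) hpn
              have hsne : s ≠ "." := by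
                intro hs
                subst hs
                rcases hp4 with h | h
                · omega
                · exact h hg
              have hfeq : ((arr.length : Int) - p.1).toNat =
                  ((arr.length : Int) - (p.1 + 1)).toNat + 1 := by omega
              rw [hfeq, pvScanB, if_pos hpn]
              simp only [hg]
              rw [if_neg hsne, if_neg (fun hc => absurd hc.1 (by omega))]
            · rw [if_neg hpn, if_neg hcr]
              rw [hArec, if_pos (by omega)]
        · -- the skip loop ran to the end of the array: the count loop does nothing
          have hl1eq : l1 = (arr.length : Int) := by omega
          have hcnt : pvCountA arr (((arr.length : Int) - l1).toNat) l1 0 = (l1, 0) := by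
            have : ((arr.length : Int) - l1).toNat = 0 := by omega
            rw [this, pvCountA]
          rw [hcnt]
          dsimp only
          have hscan : pvScanB arr cr (((arr.length : Int) - l).toNat) l1 0 =
              pvScanB arr cr 0 l1 0 :=
            pvScanB_fuel arr cr _ 0 l1 0 (by omega) (by omega)
          rw [hscan, pvScanB]
          by_cases hcr : (0 : Int) ≥ cr
          · rw [if_pos hcr, if_pos hcr, hl1eq]
          · rw [if_neg hcr, if_neg hcr, hl1eq,
                ih (arr.length : Int) (by omega) (by omega),
                if_pos (le_refl _)]

-- ===== VERDICT (by name: the statement is the Claim_ definition above) =====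
theorem find_suitable_dots_spec : Claim_equal_find_suitable_dots := by
  intro arr_new curr_r_count l _ hpre
  unfold Spec_find_suitable_dots find_suitable_dots find_suitable_dots_alt
  unfold Pre_find_suitable_dots at hpre
  rw [pvMain_eq arr_new curr_r_count _ l hpre (by omega)]
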